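-- pv_equiv track=rewrite | github.com/TheGigaChat/Python-challenges | EX/ex06_airport/airport.py | destinations_and_times
-- ===== SOURCE A (Python) =====
-- def destinations_and_times(flights: list) -> dict:
--     """
--     Create a dictionary containing destinations with the departure times for this destination today.
--
--     Flights in the list are in the format: "Tallinn,08:00,01h30m,OWL1234"
--     Where different parts are separated by comma:
--     - destination
--     - departure time
--     - flight duration
--     - flight number
--
--     Result format: {destination1: [time1, time2, ...], destination2: [time1, time2, ...]}.
--
--     The order of departure times and destinations are not important.
--
--     :param flights: given list from database.
--     :return: dictionary where keys are destinations and values are lists of departure times.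
--
--     flights = [
--     "Tallinn,08:00,01h30m,OWL1234",
--     "Helsinki,10:35,01h00m,BHM5678",
--     "Tallinn,09:00,01h30m,OWL1235",
--     ]
--     """
--     result_dict = {}  # result_dict = {destination: time1, time2}
--     for flight in flights:
--         flight_data_list = flight.split(",")
--         destination = flight_data_list[0]
--         time = flight_data_list[1]
--         result_dict[destination] = result_dict.get(destination, [])
--         result_dict[destination].append(time)
--     return result_dict
-- ===== SOURCE B (Python) =====
-- def destinations_and_times(flights: list) -> dict:
--     parts = [f.split(",") for f in flights]
--     seen = []
--     for p in parts:
--         if p[0] not in seen: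
--             seen.append(p[0])
--     return {dst: [p[1] for p in parts if p[0] == dst] for dst in seen}
-- ===== Notes on version B (the rewrite author's own statement) =====
-- stated objective: alternative
-- what changed: Replaces A's append-as-you-go dict pass with a two-phase strategy: split all flights once, collect the distinct destinations in first-occurrence order, then build each destination's time list by a per-key filter pass.
import Mathlib
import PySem

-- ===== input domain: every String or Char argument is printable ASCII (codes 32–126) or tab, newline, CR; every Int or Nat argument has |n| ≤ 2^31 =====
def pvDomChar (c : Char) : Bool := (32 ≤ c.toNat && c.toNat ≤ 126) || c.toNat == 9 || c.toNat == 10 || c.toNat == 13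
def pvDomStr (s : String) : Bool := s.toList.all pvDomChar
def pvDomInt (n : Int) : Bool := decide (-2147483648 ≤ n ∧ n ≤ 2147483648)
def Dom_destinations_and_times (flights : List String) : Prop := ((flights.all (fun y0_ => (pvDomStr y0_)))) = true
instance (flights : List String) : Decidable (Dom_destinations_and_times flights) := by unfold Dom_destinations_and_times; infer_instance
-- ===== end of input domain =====

-- B replaces A's append-as-you-go dict pass with split-once, dedup destinations in first-occurrence order, then a per-destination filter pass; same return value.


-- ===== PORT A =====
-- flight.split(",")[0] / [1]; indexing via pyGet?; the [1] default "" is only reached outside Pre_ (no comma), where Python raises IndexError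
def destinations_and_times (flights : List String) : List (String × List String) :=
  (flights.foldl
    (fun d flight =>
      let parts := (PySem.Str.split? flight ",").getD []
      let destination := (PySem.List.pyGet? parts 0).getD ""
      let time := (PySem.List.pyGet? parts 1).getD ""
      d.insert destination (d.getD destination [] ++ [time]))
    PySem.Dict.empty).items

-- ===== PORT B =====
def destinations_and_times_alt (flights : List String) : List (String × List String) :=
  let parts := flights.map (fun f => (PySem.Str.split? f ",").getD [])
  let seen := PySem.Set.ofList (parts.map (fun p => (PySem.List.pyGet? p 0).getD ""))
  seen.map (fun dst =>
    (dst, (parts.filter (fun p => (PySem.List.pyGet? p 0).getD "" == dst)).map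
            (fun p => (PySem.List.pyGet? p 1).getD "")))

-- ===== PRECONDITION & SPEC =====
-- Pre_ excludes flights with no comma: there flight.split(",")[1] raises IndexError in A (B raises there too).
def Pre_destinations_and_times (flights : List String) : Prop :=
  ∀ f ∈ flights, ',' ∈ f.toList
instance (flights : List String) : Decidable (Pre_destinations_and_times flights) := by
  unfold Pre_destinations_and_times; infer_instance
def pvWitness_destinations_and_times : List String :=
  ["Tallinn,08:00,01h30m,OWL1234", "Helsinki,10:35,01h00m,BHM5678", "Tallinn,09:00,01h30m,OWL1235"]
def Spec_destinations_and_times (flights : List String) (out : List (String × List String)) : Prop := out = destinations_and_times_alt flights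
instance (flights : List String) (out : List (String × List String)) : Decidable (Spec_destinations_and_times flights out) := by unfold Spec_destinations_and_times; infer_instance

-- ===== CLAIM (what is proved, stated in full; the proofs are below) =====
def Claim_equal_destinations_and_times : Prop := ∀ (flights : List String), Dom_destinations_and_times flights → Pre_destinations_and_times flights → Spec_destinations_and_times flights (destinations_and_times flights)

-- ===== LEMMAS AND PROOFS =====
-- destination / time of one flight string (proof-only abbreviations for the shared split-and-index step)
def pvKey (f : String) : String := (PySem.List.pyGet? ((PySem.Str.split? f ",").getD []) 0).getD ""
def pvVal (f : String) : String := (PySem.List.pyGet? ((PySem.Str.split? f ",").getD []) 1).getD ""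

theorem ports_eq (flights : List String) :
    destinations_and_times flights = destinations_and_times_alt flights := by
  -- A's loop body 'insert k (getD k [] ++ [v])' IS 'modify k [] (· ++ [v])' over the (key, value) pairs
  have hA : destinations_and_times flights
      = (List.foldl (fun d p => d.modify p.1 [] (fun x => x ++ [p.2])) PySem.Dict.empty
          (flights.map (fun f => (pvKey f, pvVal f)))).items := by
    rw [List.foldl_map]; rfl
  rw [hA]
  have hnd := PySem.Dict.nodup_keys_foldl_modify_key (flights.map (fun f => (pvKey f, pvVal f)))
      Prod.fst [] (fun _ p x => x ++ [p.2]) PySem.Dict.empty (by simp [PySem.Dict.keys_empty])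
  rw [PySem.Dict.items_eq_map_keys _ hnd []]
  rw [PySem.Dict.keys_foldl_modify_key]
  simp only [PySem.Dict.keys_empty, PySem.Set.update_nil_left, List.map_map]
  unfold destinations_and_times_alt
  simp only [List.map_map, List.filter_map, List.map_map]
  apply List.map_congr_left
  intro k hk
  simp only [PySem.Dict.getD_foldl_modify_append, PySem.Dict.getD_empty, List.nil_append,
    List.filter_map, List.map_map]
  rfl

-- ===== VERDICT (by name: the statement is the Claim_ definition above) =====
theorem destinations_and_times_spec : Claim_equal_destinations_and_times := by
  intro flights _ _
  exact ports_eq flights
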